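-- pv_equiv track=rewrite | github.com/tompedro/School | cramer.py | sostituteColoumn
-- ===== SOURCE A (Python) =====
-- def sostituteColoumn(matrix,other,integer,length):
--     res = []
--     for i in range(len(matrix)):
--         if (i - integer) % length == 0:
--             res.append(other[int((i - integer) / length)])
--         else:
--             res.append(matrix[i])
--     return res
-- ===== SOURCE B (Python) =====
-- def sostituteColoumn(matrix, other, integer, length):
--     # Copy matrix and overwrite only the replaced positions: the indices i with
--     # i ≡ integer (mod |length|), stepping by |length| from the first hit.
--     res = list(matrix)
--     step = abs(length)
--     if res and step:
--         start = integer % step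
--         for i in range(start, len(res), step):
--             res[i] = other[(i - integer) // length]
--     return res
-- ===== Notes on version B (the rewrite author's own statement) =====
-- stated objective: alternative
-- what changed: Instead of scanning every index and testing (i-integer)%length==0, B copies the matrix and overwrites only the replaced positions, stepping through the arithmetic progression starting at integer%abs(length) with step abs(length).
import Mathlib
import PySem

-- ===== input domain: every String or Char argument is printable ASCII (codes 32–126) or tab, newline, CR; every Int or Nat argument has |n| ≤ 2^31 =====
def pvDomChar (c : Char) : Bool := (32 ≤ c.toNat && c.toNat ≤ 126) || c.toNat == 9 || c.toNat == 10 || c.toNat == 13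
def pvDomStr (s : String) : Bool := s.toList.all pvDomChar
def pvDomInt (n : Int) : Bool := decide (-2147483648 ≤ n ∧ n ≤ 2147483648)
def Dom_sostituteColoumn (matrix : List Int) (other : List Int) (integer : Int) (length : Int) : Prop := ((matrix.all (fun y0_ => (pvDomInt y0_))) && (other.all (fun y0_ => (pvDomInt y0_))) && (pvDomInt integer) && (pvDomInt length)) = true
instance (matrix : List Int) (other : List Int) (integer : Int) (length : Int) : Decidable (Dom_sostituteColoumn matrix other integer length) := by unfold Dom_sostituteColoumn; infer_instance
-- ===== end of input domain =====

-- B rewrites A's scan-and-test over every index as "copy the matrix, then overwrite only the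
-- replaced positions along the arithmetic progression integer % |length|, step |length|" (simpler decomposition).

-- ===== PORT A =====
-- Python builds res index by index; in the branch taken, length divides (i - integer), so the
-- float-truncating int((i - integer) / length) is the exact quotient = floor division (exact here).
def sostituteColoumn (matrix : List Int) (other : List Int) (integer : Int) (length : Int) : List Int :=
  (PySem.List.pyRange 0 (matrix.length : Int) 1).foldl
    (fun res i =>
      if PySem.Int.mod (i - integer) length = 0 then
        res ++ [PySem.List.pyGetD other (PySem.Int.floordiv (i - integer) length) 0]
      else
        res ++ [PySem.List.pyGetD matrix i 0]) []

-- ===== PORT B =====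
def sostituteColoumn_alt (matrix : List Int) (other : List Int) (integer : Int) (length : Int) : List Int :=
  let step := |length|
  if matrix.isEmpty || step == 0 then matrix
  else
    let start := PySem.Int.mod integer step
    (PySem.List.pyRange start (matrix.length : Int) step).foldl
      (fun res i =>
        PySem.List.pySetD res i (PySem.List.pyGetD other (PySem.Int.floordiv (i - integer) length) 0))
      matrix

-- ===== PRECONDITION & SPEC =====
-- Pre_ excludes exactly the inputs where A raises: ZeroDivisionError (length = 0 with a nonempty
-- matrix) and IndexError (some replaced position indexes `other` out of its Python range).
def Pre_sostituteColoumn (matrix : List Int) (other : List Int) (integer : Int) (length : Int) : Prop :=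
  (matrix = [] ∨ length ≠ 0) ∧
  ∀ i ∈ PySem.List.pyRange 0 (matrix.length : Int) 1,
    PySem.Int.mod (i - integer) length = 0 →
    PySem.Raise.InRange other.length (PySem.Int.floordiv (i - integer) length)
instance (matrix : List Int) (other : List Int) (integer : Int) (length : Int) : Decidable (Pre_sostituteColoumn matrix other integer length) := by unfold Pre_sostituteColoumn; infer_instance

def pvWitness_sostituteColoumn : List Int × List Int × Int × Int := ([1, 2, 3, 4], [9, 9], 0, 2)

def Spec_sostituteColoumn (matrix : List Int) (other : List Int) (integer : Int) (length : Int) (out : List Int) : Prop := out = sostituteColoumn_alt matrix other integer length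
instance (matrix : List Int) (other : List Int) (integer : Int) (length : Int) (out : List Int) : Decidable (Spec_sostituteColoumn matrix other integer length out) := by unfold Spec_sostituteColoumn; infer_instance

-- ===== CLAIM (what is proved, stated in full; the proofs are below) =====
def Claim_equal_sostituteColoumn : Prop := ∀ (matrix : List Int) (other : List Int) (integer : Int) (length : Int), Dom_sostituteColoumn matrix other integer length → Pre_sostituteColoumn matrix other integer length → Spec_sostituteColoumn matrix other integer length (sostituteColoumn matrix other integer length)

-- ===== LEMMAS AND PROOFS =====

-- A's loop is a map over range(len(matrix)).
theorem sostituteColoumn_eq_map (matrix other : List Int) (integer length : Int) :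
    sostituteColoumn matrix other integer length =
      (PySem.List.pyRange 0 (matrix.length : Int) 1).map (fun i =>
        if PySem.Int.mod (i - integer) length = 0 then
          PySem.List.pyGetD other (PySem.Int.floordiv (i - integer) length) 0
        else
          PySem.List.pyGetD matrix i 0) := by
  unfold sostituteColoumn
  have h : (fun (res : List Int) (i : Int) =>
      if PySem.Int.mod (i - integer) length = 0 then
        res ++ [PySem.List.pyGetD other (PySem.Int.floordiv (i - integer) length) 0]
      else
        res ++ [PySem.List.pyGetD matrix i 0]) =
      (fun (res : List Int) (i : Int) => res ++
        [if PySem.Int.mod (i - integer) length = 0 then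
          PySem.List.pyGetD other (PySem.Int.floordiv (i - integer) length) 0
        else
          PySem.List.pyGetD matrix i 0]) := by
    funext res i; split <;> rfl
  rw [h, PySem.List.foldl_append_singleton_eq_map]
  simp

theorem length_foldl_setD (g : Int → Int) (l : List Int) (r : List Int) :
    (l.foldl (fun res i => PySem.List.pySetD res i (g i)) r).length = r.length := by
  induction l generalizing r with
  | nil => rfl
  | cons a t ih => simp [List.foldl_cons, ih, PySem.List.length_pySetD]

-- The written value depends only on the index, so last-write-wins is just membership.
theorem getD_foldl_setD (g : Int → Int) (l : List Int) (r : List Int) (j : Nat)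
    (hj : j < r.length) (hb : ∀ i ∈ l, 0 ≤ i ∧ i < (r.length : Int)) :
    PySem.List.pyGetD (l.foldl (fun res i => PySem.List.pySetD res i (g i)) r) (j : Int) 0 =
      if (j : Int) ∈ l then g (j : Int) else PySem.List.pyGetD r (j : Int) 0 := by
  induction l generalizing r with
  | nil => simp
  | cons a t ih =>
    obtain ⟨ha0, halt⟩ := hb a (List.mem_cons_self)
    have hna : a = ((a.toNat : Nat) : Int) := (Int.toNat_of_nonneg ha0).symm
    have hlen : (PySem.List.pySetD r a (g a)).length = r.length := PySem.List.length_pySetD r a (g a)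
    have hnalt : a.toNat < r.length := by omega
    rw [List.foldl_cons]
    rw [ih (PySem.List.pySetD r a (g a)) (by omega)
      (fun i hi => by have := hb i (List.mem_cons_of_mem a hi); omega)]
    by_cases ht : (j : Int) ∈ t
    · simp [List.mem_cons, ht]
    · have hnalt' : a.toNat < r.length := by omega
      rw [hna, PySem.List.pyGetD_pySetD_natCast r a.toNat j _ 0 hnalt']
      by_cases hja : j = a.toNat
      · subst hja
        rw [if_pos rfl, if_pos (List.mem_cons_self)]
        split <;> rfl
      · have hji : ¬ ((j : Int) = ((a.toNat : Nat) : Int)) := by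
          exact_mod_cast hja
        have hmem : ¬ ((j : Int) ∈ ((a.toNat : Nat) : Int) :: t) := by
          simp only [List.mem_cons, not_or]; exact ⟨hji, ht⟩
        rw [if_neg ht, if_neg hja, if_neg hmem]

-- Membership in B's arithmetic progression = A's divisibility test, for 0 ≤ j < n.
theorem mem_progression (n : Nat) (integer length : Int) (hl : length ≠ 0) (j : Nat) (hj : j < n) :
    ((j : Int) ∈ PySem.List.pyRange (PySem.Int.mod integer |length|) (n : Int) |length|) ↔
      PySem.Int.mod ((j : Int) - integer) length = 0 := by
  have hs : 0 < |length| := abs_pos.mpr hl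
  have hse : PySem.Int.mod integer |length| = integer % |length| := PySem.Int.mod_eq_emod_of_pos hs
  have hst0 : 0 ≤ PySem.Int.mod integer |length| := by
    rw [hse]; exact Int.emod_nonneg _ (ne_of_gt hs)
  have hstlt : PySem.Int.mod integer |length| < |length| := by
    rw [hse]; exact Int.emod_lt_of_pos _ hs
  have hdvdst : |length| ∣ (integer - PySem.Int.mod integer |length|) := by
    refine ⟨PySem.Int.floordiv integer |length|, ?_⟩
    have := PySem.Int.floordiv_mul_add_mod integer |length|
    linarith [mul_comm (PySem.Int.floordiv integer |length|) |length|]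
  rw [PySem.List.mem_pyRange_iff_of_pos hs, PySem.Int.mod_eq_zero_iff_dvd]
  constructor
  · rintro ⟨h1, h2, hd⟩
    have : |length| ∣ ((j : Int) - integer) := by
      obtain ⟨k, hk⟩ := hd
      obtain ⟨m, hm⟩ := hdvdst
      exact ⟨k - m, by rw [mul_sub]; linarith⟩
    exact (abs_dvd _ _).mp this
  · intro hd
    have hd' : |length| ∣ ((j : Int) - integer) := (abs_dvd _ _).mpr hd
    obtain ⟨m, hm⟩ := hdvdst
    obtain ⟨k, hk⟩ := hd'
    have hdj : (j : Int) - PySem.Int.mod integer |length| = |length| * (k + m) := by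
      rw [mul_add]; omega
    refine ⟨?_, by exact_mod_cast hj, ⟨k + m, hdj⟩⟩
    by_cases hkm : 0 ≤ k + m
    · nlinarith
    · have : |length| * (k + m) ≤ |length| * (-1) :=
        mul_le_mul_of_nonneg_left (by omega) (le_of_lt hs)
      have hj0 : (0 : Int) ≤ (j : Int) := Int.natCast_nonneg j
      nlinarith

theorem sostituteColoumn_eq (matrix other : List Int) (integer length : Int)
    (hpre : Pre_sostituteColoumn matrix other integer length) :
    sostituteColoumn matrix other integer length = sostituteColoumn_alt matrix other integer length := by
  by_cases hm : matrix = []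
  · subst hm
    simp [sostituteColoumn, sostituteColoumn_alt, PySem.List.pyRange_one_eq_nil (le_refl (0 : Int))]
  · have hl : length ≠ 0 := hpre.1.resolve_left hm
    have hs : 0 < |length| := abs_pos.mpr hl
    have hme : matrix.isEmpty = false := by simp [hm]
    have halt : sostituteColoumn_alt matrix other integer length =
        (PySem.List.pyRange (PySem.Int.mod integer |length|) (matrix.length : Int) |length|).foldl
          (fun res i =>
            PySem.List.pySetD res i (PySem.List.pyGetD other (PySem.Int.floordiv (i - integer) length) 0))
          matrix := by
      unfold sostituteColoumn_alt
      simp [hme, abs_eq_zero, hl]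
    rw [sostituteColoumn_eq_map, halt]
    have hbounds : ∀ i ∈ PySem.List.pyRange (PySem.Int.mod integer |length|) (matrix.length : Int) |length|,
        0 ≤ i ∧ i < (matrix.length : Int) := by
      intro i hi
      rw [PySem.List.mem_pyRange_iff_of_pos hs] at hi
      have hst0 : 0 ≤ PySem.Int.mod integer |length| := by
        rw [PySem.Int.mod_eq_emod_of_pos hs]; exact Int.emod_nonneg _ (ne_of_gt hs)
      exact ⟨le_trans hst0 hi.1, hi.2.1⟩
    apply List.ext_getElem
    · rw [length_foldl_setD]
      simp [PySem.List.length_pyRange_one]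
    · intro k hk1 hk2
      have hkn : k < matrix.length := by
        rw [length_foldl_setD] at hk2; exact hk2
      have hlhs : ((PySem.List.pyRange 0 (matrix.length : Int) 1).map (fun i =>
          if PySem.Int.mod (i - integer) length = 0 then
            PySem.List.pyGetD other (PySem.Int.floordiv (i - integer) length) 0
          else
            PySem.List.pyGetD matrix i 0))[k] =
          (if PySem.Int.mod ((k : Int) - integer) length = 0 then
            PySem.List.pyGetD other (PySem.Int.floordiv ((k : Int) - integer) length) 0
          else
            PySem.List.pyGetD matrix (k : Int) 0) := by
        rw [List.getElem_map]
        rw [PySem.List.getElem_pyRange_one]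
        simp
      rw [hlhs]
      have hrhs := getD_foldl_setD
        (fun i => PySem.List.pyGetD other (PySem.Int.floordiv (i - integer) length) 0)
        (PySem.List.pyRange (PySem.Int.mod integer |length|) (matrix.length : Int) |length|)
        matrix k hkn hbounds
      have hcast : ((k : Int)) < (((PySem.List.pyRange (PySem.Int.mod integer |length|) (matrix.length : Int) |length|).foldl
          (fun res i => PySem.List.pySetD res i (PySem.List.pyGetD other (PySem.Int.floordiv (i - integer) length) 0))
          matrix).length : Int) := by
        rw [length_foldl_setD]; exact_mod_cast hkn
      have h1 := PySem.List.pyGetD_eq_getElem _ 0 (Int.natCast_nonneg k) hcast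
      simp only [Int.toNat_natCast] at h1
      rw [← h1, hrhs]
      simp only [mem_progression matrix.length integer length hl k hkn]

-- ===== VERDICT (by name: the statement is the Claim_ definition above) =====
theorem sostituteColoumn_spec : Claim_equal_sostituteColoumn := by
  intro matrix other integer length _ hpre
  unfold Spec_sostituteColoumn
  exact sostituteColoumn_eq matrix other integer length hpre
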